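-- pv_equiv track=rewrite | github.com/bryanhooi/python-projects | hiring.py | valid_teams
-- ===== SOURCE A (Python) =====
-- def skills(candidates):
--     skills_possessed = []                                       # initialise skills_possessed with an empty list
--     for candidate in candidates:                                # iterate through each candidate in given list of candidates
--         for skills in candidate[0]:                             # iterate through all the skills in candidate's list of skills
--             if skills not in skills_possessed:                  # if the current skill is not in the skills_possessed list,
--                 skills_possessed += [skills]                    # append it to skills_possessed
--     return skills_possessed                                     # return skills_possessed
--
-- def uncovered(project, skills):
--     uncovered_skills = []                           # assign an empty list to the variable uncovered_skills
--     for skills_required in project:                 # iterating through each element in project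
--         if skills_required not in skills:           # if the current element is not in skills
--             uncovered_skills += [skills_required]   # append current element to uncovered_skills
--     return uncovered_skills                         # return uncovered_skills
--
-- def valid_teams(project, given_teams, candidates):
--     valid_teams = []                                            # initialise the variable valid_teams with an empty list
--
--     for team in given_teams:                                    # iterating through every element in given_teams
--         actual_team = []                                        # create a new variable actual_team and assign an empty list to it
--         for i in range(len(team)):                              # iterating through every element in team itself
--             if team[i] == 1:                                    # checks if current element is 1
--                 actual_team.append(candidates[i])               # if so, append the element at index i in candidates to actual_team
--         if len(uncovered(project, skills(actual_team))) == 0:   # checks if number of uncovered skills for that actual team is 0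
--             valid_teams.append(actual_team)                     # if so, append the actual team to valid_teams
--
--     return valid_teams                                          # return valid_teams
-- ===== SOURCE B (Python) =====
-- def valid_teams(project, given_teams, candidates):
--     # Inverted index built once: skill -> set of candidate indices possessing it.
--     possessors = {}
--     for i, cand in enumerate(candidates):
--         if cand:
--             for s in cand[0]:
--                 possessors.setdefault(s, set()).add(i)
--     result = []
--     for team in given_teams:
--         members = [i for i, f in enumerate(team) if f == 1]
--         mset = set(members)
--         if all(not mset.isdisjoint(possessors.get(s, ())) for s in project):
--             result.append([candidates[i] for i in members])
--     return result
-- ===== Notes on version B (the rewrite author's own statement) =====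
-- stated objective: faster
-- what changed: Builds an inverted index (skill -> set of candidate indices) once up front, so each team is tested by a disjointness check of its member-index set against each required skill's possessor set, instead of A's per-team dedup of a combined skills list followed by a quadratic uncovered scan.
import Mathlib
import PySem

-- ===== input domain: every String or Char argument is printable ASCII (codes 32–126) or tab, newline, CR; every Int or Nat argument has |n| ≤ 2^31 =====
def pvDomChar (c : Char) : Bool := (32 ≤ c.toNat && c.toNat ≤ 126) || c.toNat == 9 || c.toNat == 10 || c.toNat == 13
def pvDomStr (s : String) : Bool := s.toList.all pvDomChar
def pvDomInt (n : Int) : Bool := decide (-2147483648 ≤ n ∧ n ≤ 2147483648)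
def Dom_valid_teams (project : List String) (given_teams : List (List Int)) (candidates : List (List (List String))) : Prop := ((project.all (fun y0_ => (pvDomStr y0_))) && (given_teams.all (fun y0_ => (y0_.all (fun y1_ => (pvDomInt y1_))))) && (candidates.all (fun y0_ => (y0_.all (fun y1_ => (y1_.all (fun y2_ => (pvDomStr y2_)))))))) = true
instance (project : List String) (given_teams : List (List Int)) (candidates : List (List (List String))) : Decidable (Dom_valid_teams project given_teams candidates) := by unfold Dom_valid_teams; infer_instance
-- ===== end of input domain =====

-- B builds an inverted index (skill -> possessor indices) once and tests each team by
-- set disjointness against its member-index set (measured asymptotically faster).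

-- ===== PORT A =====
-- skills(candidates): dedup-append of every selected candidate's skill list
def pySkillsA (candidates : List (List (List String))) : List String :=
  candidates.foldl (fun sp candidate =>
    (PySem.List.pyGetD candidate 0 []).foldl
      (fun sp s => if s ∈ sp then sp else sp ++ [s]) sp) []

-- uncovered(project, skills): the required skills missing from `skills`
def pyUncoveredA (project : List String) (skills : List String) : List String :=
  project.foldl (fun u r => if r ∈ skills then u else u ++ [r]) []

def valid_teams (project : List String) (given_teams : List (List Int)) (candidates : List (List (List String))) : List (List (List (List String))) :=
  given_teams.foldl (fun vt team =>
    let actual := (PySem.List.pyRange 0 team.length 1).foldl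
      (fun ac i => if PySem.List.pyGetD team i 0 = 1
                   then ac ++ [PySem.List.pyGetD candidates i []] else ac) []
    if (pyUncoveredA project (pySkillsA actual)).length = 0 then vt ++ [actual] else vt) []

-- ===== PORT B =====
-- the inverted index: possessors.setdefault(s, set()).add(i) over all candidates' skills
def buildPoss (candidates : List (List (List String))) : PySem.Dict String (PySem.Set Int) :=
  (PySem.List.enumerate candidates).foldl (fun P p =>
    if p.2 = [] then P
    else (PySem.List.pyGetD p.2 0 []).foldl
      (fun P s => PySem.Dict.insert P s (PySem.Set.add (PySem.Dict.getD P s PySem.Set.empty) p.1)) P)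
    PySem.Dict.empty

def valid_teams_alt (project : List String) (given_teams : List (List Int)) (candidates : List (List (List String))) : List (List (List (List String))) :=
  let possessors := buildPoss candidates
  given_teams.foldl (fun result team =>
    let members := (PySem.List.enumerate team).filterMap (fun p => if p.2 = 1 then some p.1 else none)
    let mset : PySem.Set Int := PySem.Set.ofList members
    if project.all (fun s => ! PySem.Set.isdisjoint mset (PySem.Dict.getD possessors s PySem.Set.empty))
    then result ++ [members.map (fun i => PySem.List.pyGetD candidates i [])]
    else result) []

-- ===== PRECONDITION & SPEC =====
-- Pre_ excludes exactly the inputs on which the Python A raises IndexError: a team marking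
-- position k with 1 while candidates has no index k (candidates[i] raises), or while
-- candidates[k] is the empty list (candidate[0] inside skills() raises).
def Pre_valid_teams (project : List String) (given_teams : List (List Int)) (candidates : List (List (List String))) : Prop :=
  (given_teams.all (fun team => (List.range team.length).all (fun k =>
    !(team.getD k 0 == 1) || (decide (k < candidates.length) && !(candidates.getD k [] == []))))) = true
instance (project : List String) (given_teams : List (List Int)) (candidates : List (List (List String))) : Decidable (Pre_valid_teams project given_teams candidates) := by unfold Pre_valid_teams; infer_instance

def pvWitness_valid_teams : List String × List (List Int) × List (List (List String)) :=
  (["a", "b"], [[1, 1], [1, 0], [0, 1]], [[["a"], ["x"]], [["b", "c"]]])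

def Spec_valid_teams (project : List String) (given_teams : List (List Int)) (candidates : List (List (List String))) (out : List (List (List (List String)))) : Prop := out = valid_teams_alt project given_teams candidates
instance (project : List String) (given_teams : List (List Int)) (candidates : List (List (List String))) (out : List (List (List (List String)))) : Decidable (Spec_valid_teams project given_teams candidates out) := by unfold Spec_valid_teams; infer_instance

-- ===== CLAIM (what is proved, stated in full; the proofs are below) =====
def Claim_equal_valid_teams : Prop := ∀ (project : List String) (given_teams : List (List Int)) (candidates : List (List (List String))), Dom_valid_teams project given_teams candidates → Pre_valid_teams project given_teams candidates → Spec_valid_teams project given_teams candidates (valid_teams project given_teams candidates)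

-- ===== LEMMAS AND PROOFS =====

-- membership through A's dedup-append accumulator (one candidate's skill list)
lemma mem_dedup_fold (r : String) :
    ∀ (ss : List String) (acc : List String),
    r ∈ ss.foldl (fun sp s => if s ∈ sp then sp else sp ++ [s]) acc ↔ r ∈ acc ∨ r ∈ ss
  | [], acc => by simp
  | s :: ss, acc => by
    simp only [List.foldl_cons]
    split_ifs with h
    · rw [mem_dedup_fold r ss acc]
      simp only [List.mem_cons]
      constructor
      · tauto
      · rintro (h1 | rfl | h1) <;> tauto
    · rw [mem_dedup_fold r ss (acc ++ [s])]; simp; tauto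

lemma mem_skillsA_aux (r : String) :
    ∀ (cs : List (List (List String))) (acc : List String),
    r ∈ cs.foldl (fun sp candidate =>
      (PySem.List.pyGetD candidate 0 []).foldl
        (fun sp s => if s ∈ sp then sp else sp ++ [s]) sp) acc ↔
    r ∈ acc ∨ ∃ c ∈ cs, r ∈ PySem.List.pyGetD c 0 []
  | [], acc => by simp
  | c :: cs, acc => by
    simp only [List.foldl_cons]
    rw [mem_skillsA_aux r cs _, mem_dedup_fold r]
    simp; tauto

-- A's uncovered loop is a filter
lemma uncovered_fold (skills : List String) :
    ∀ (project : List String) (acc : List String),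
    project.foldl (fun u r => if r ∈ skills then u else u ++ [r]) acc =
      acc ++ project.filter (fun r => decide (r ∉ skills))
  | [], acc => by simp
  | r :: project, acc => by
    simp only [List.foldl_cons, List.filter_cons]
    split_ifs with h <;> simp_all [uncovered_fold skills project]

-- membership through the inner fold of buildPoss (one candidate's skill list)
lemma mem_poss_inner (s : String) (i j : Int) :
    ∀ (ss : List String) (P : PySem.Dict String (PySem.Set Int)),
    i ∈ PySem.Dict.getD
      (ss.foldl (fun P s' => PySem.Dict.insert P s' (PySem.Set.add (PySem.Dict.getD P s' PySem.Set.empty) j)) P)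
      s PySem.Set.empty ↔
    i ∈ PySem.Dict.getD P s PySem.Set.empty ∨ (i = j ∧ s ∈ ss)
  | [], P => by simp
  | s' :: ss, P => by
    simp only [List.foldl_cons]
    rw [mem_poss_inner s i j ss _]
    rw [PySem.Dict.getD_insert]
    by_cases h : s = s'
    · subst h; simp [PySem.Set.mem_add]; tauto
    · simp [h]


-- membership through the outer fold of buildPoss
lemma mem_poss_outer (s : String) (i : Int) :
    ∀ (l : List (Int × List (List String))) (P : PySem.Dict String (PySem.Set Int)),
    i ∈ PySem.Dict.getD
      (l.foldl (fun P p =>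
        if p.2 = [] then P
        else (PySem.List.pyGetD p.2 0 []).foldl
          (fun P s' => PySem.Dict.insert P s' (PySem.Set.add (PySem.Dict.getD P s' PySem.Set.empty) p.1)) P) P)
      s PySem.Set.empty ↔
    i ∈ PySem.Dict.getD P s PySem.Set.empty ∨ ∃ p ∈ l, p.2 ≠ [] ∧ i = p.1 ∧ s ∈ PySem.List.pyGetD p.2 0 []
  | [], P => by simp
  | p :: l, P => by
    simp only [List.foldl_cons]
    rw [mem_poss_outer s i l _]
    by_cases h : p.2 = []
    · simp [h]
    · rw [if_neg h, mem_poss_inner]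
      simp [h]; tauto


lemma mem_buildPoss (cs : List (List (List String))) (s : String) (i : Int) :
    i ∈ PySem.Dict.getD (buildPoss cs) s PySem.Set.empty ↔
    ∃ k : Nat, ∃ h : k < cs.length, i = (k : Int) ∧ cs[k] ≠ [] ∧ s ∈ PySem.List.pyGetD cs[k] 0 [] := by
  unfold buildPoss
  rw [mem_poss_outer]
  simp only [PySem.Dict.getD, PySem.Dict.empty]
  constructor
  · rintro (h | ⟨p, hp, hne, rfl, hs⟩)
    · simp [PySem.Dict.get?] at h
    · rw [PySem.List.mem_enumerate_iff] at hp
      obtain ⟨k, hk, rfl⟩ := hp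
      exact ⟨k, hk, by simp, hne, hs⟩
  · rintro ⟨k, hk, rfl, hne, hs⟩
    right
    exact ⟨((k : Int), cs[k]), by rw [PySem.List.mem_enumerate_iff]; exact ⟨k, hk, by simp⟩, hne, rfl, hs⟩


lemma foldl_append_if_eq_filterMap {α β : Type} (p : α → Prop) [DecidablePred p] (f : α → β) :
    ∀ (l : List α) (acc : List β),
    l.foldl (fun ac x => if p x then ac ++ [f x] else ac) acc =
      acc ++ l.filterMap (fun x => if p x then some (f x) else none)
  | [], acc => by simp
  | x :: l, acc => by
    simp only [List.foldl_cons, List.filterMap_cons]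
    split_ifs with h
    · rw [foldl_append_if_eq_filterMap p f l (acc ++ [f x])]; simp
    · rw [foldl_append_if_eq_filterMap p f l acc]

-- A's index loop produces exactly B's members mapped through candidates
lemma actual_eq (team : List Int) (candidates : List (List (List String))) :
    (PySem.List.pyRange 0 team.length 1).foldl
      (fun ac i => if PySem.List.pyGetD team i 0 = 1
                   then ac ++ [PySem.List.pyGetD candidates i []] else ac) [] =
    ((PySem.List.enumerate team).filterMap (fun p => if p.2 = 1 then some p.1 else none)).map
      (fun i => PySem.List.pyGetD candidates i []) := by
  rw [PySem.List.enumerate_eq_map_pyRange team 0, List.filterMap_map,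
      foldl_append_if_eq_filterMap (fun i => PySem.List.pyGetD team i 0 = 1)
        (fun i => PySem.List.pyGetD candidates i []), List.map_filterMap]
  simp [Function.comp, PySem.List.len, apply_ite]


-- membership in B's member list
lemma mem_members (team : List Int) (i : Int) :
    i ∈ (PySem.List.enumerate team).filterMap (fun p => if p.2 = 1 then some p.1 else none) ↔
    ∃ k : Nat, ∃ h : k < team.length, i = (k : Int) ∧ team[k] = 1 := by
  simp only [List.mem_filterMap, PySem.List.mem_enumerate_iff]
  constructor
  · rintro ⟨p, ⟨k, hk, rfl⟩, hifsome⟩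
    simp only at hifsome
    split_ifs at hifsome with h1
    · obtain rfl := Option.some.inj hifsome
      exact ⟨k, hk, by simp, h1⟩
  · rintro ⟨k, hk, rfl, h1⟩
    exact ⟨((k:Int), team[k]), ⟨k, hk, by simp⟩, by simp [h1]⟩


lemma skill_bridge (s : String) (team : List Int) (candidates : List (List (List String)))
    (hpre : ∀ k : Nat, k < team.length → team.getD k 0 = 1 →
      k < candidates.length ∧ candidates.getD k [] ≠ []) :
    (∃ i ∈ (PySem.List.enumerate team).filterMap (fun p => if p.2 = 1 then some p.1 else none),
       s ∈ PySem.List.pyGetD (PySem.List.pyGetD candidates i []) 0 []) ↔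
    (∃ i ∈ (PySem.List.enumerate team).filterMap (fun p => if p.2 = 1 then some p.1 else none),
       i ∈ PySem.Dict.getD (buildPoss candidates) s PySem.Set.empty) := by
  constructor
  · rintro ⟨i, hi, hs⟩
    obtain ⟨k, hk, rfl, h1⟩ := (mem_members team i).mp hi
    obtain ⟨hklt, hne⟩ := hpre k hk (by rw [List.getD_eq_getElem _ _ hk]; exact h1)
    refine ⟨(k : Int), hi, (mem_buildPoss candidates s _).mpr ⟨k, hklt, rfl, ?_, ?_⟩⟩
    · rwa [List.getD_eq_getElem _ _ hklt] at hne
    · rwa [PySem.List.pyGetD_natCast, List.getD_eq_getElem _ _ hklt] at hs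
  · rintro ⟨i, hi, hp⟩
    obtain ⟨k, hk, rfl, h1⟩ := (mem_members team i).mp hi
    obtain ⟨k', hk', hkk, hne, hs⟩ := (mem_buildPoss candidates s _).mp hp
    obtain rfl : k = k' := by exact_mod_cast hkk
    refine ⟨(k : Int), hi, ?_⟩
    rwa [PySem.List.pyGetD_natCast, List.getD_eq_getElem _ _ hk']

-- the two per-team validity conditions agree under Pre_'s per-team guarantee
lemma cond_eq (project : List String) (team : List Int) (candidates : List (List (List String)))
    (hpre : ∀ k : Nat, k < team.length → team.getD k 0 = 1 →
      k < candidates.length ∧ candidates.getD k [] ≠ []) :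
    ((pyUncoveredA project (pySkillsA
        (((PySem.List.enumerate team).filterMap (fun p => if p.2 = 1 then some p.1 else none)).map
          (fun i => PySem.List.pyGetD candidates i [])))).length = 0) ↔
    (project.all (fun s => ! PySem.Set.isdisjoint
      (PySem.Set.ofList ((PySem.List.enumerate team).filterMap (fun p => if p.2 = 1 then some p.1 else none)))
      (PySem.Dict.getD (buildPoss candidates) s PySem.Set.empty)) = true) := by
  rw [pyUncoveredA, uncovered_fold]
  simp only [List.nil_append, List.length_eq_zero_iff, List.filter_eq_nil_iff, List.all_eq_true,
    decide_eq_true_eq, Bool.not_eq_true']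
  refine forall₂_congr (fun s hs => ?_)
  rw [not_not, pySkillsA, mem_skillsA_aux, Bool.eq_false_iff, Ne, PySem.Set.isdisjoint_iff]
  push Not
  simp only [List.mem_map, PySem.Set.mem_ofList]
  rw [← skill_bridge s team candidates hpre]
  constructor
  · rintro (h | ⟨c, ⟨i, hi, rfl⟩, hc⟩)
    · simp at h
    · exact ⟨i, hi, hc⟩
  · rintro ⟨i, hi, hc⟩
    exact Or.inr ⟨_, ⟨i, hi, rfl⟩, hc⟩


-- ===== VERDICT (by name: the statement is the Claim_ definition above) =====
theorem valid_teams_spec : Claim_equal_valid_teams := by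
  intro project given_teams candidates _ hpre
  unfold Spec_valid_teams
  simp only [valid_teams, valid_teams_alt]
  apply PySem.List.foldl_congr_mem
  intro acc team hteam
  rw [actual_eq team candidates]
  refine if_congr ?_ rfl rfl
  apply cond_eq
  intro k hk h1
  unfold Pre_valid_teams at hpre
  simp only [List.all_eq_true] at hpre
  have := hpre team hteam
  have hk' := this k (by simpa using hk)
  simp only [Bool.or_eq_true, Bool.not_eq_true', beq_eq_false_iff_ne, Bool.and_eq_true,
    decide_eq_true_eq] at hk'
  rcases hk' with h | h
  · exact absurd h1 h
  · exact ⟨h.1, h.2⟩
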